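-- pv_equiv track=rewrite | github.com/SSteel2/AdventOfCode | 2025/09/9.py | _is_point_in_positions_x
-- ===== SOURCE A (Python) =====
-- def _is_point_in_positions_x(point, positions):
-- 	# calculating winding number by assuming a line in x+ axis
-- 	if positions[0][0] == positions[1][0]:
-- 		paired_range = range(0, len(positions), 2)
-- 	else:
-- 		paired_range = range(-1, len(positions) - 1, 2)
-- 	border_reached = False
-- 	winding_number = 0
-- 	for i in paired_range:
-- 		if positions[i][0] <= point[0]:
-- 			continue
-- 		elif positions[i][1] > point[1] and positions[i + 1][1] < point[1]:
-- 			winding_number += 2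
-- 		elif positions[i][1] < point[1] and positions[i + 1][1] > point[1]:
-- 			winding_number -= 2
-- 		elif positions[i][1] > point[1] and positions[i + 1][1] == point[1] or positions[i][1] == point[1] and positions[i + 1][1] < point[1]:
-- 			winding_number += 1
-- 		elif positions[i][1] < point[1] and positions[i + 1][1] == point[1] or positions[i][1] == point[1] and positions[i + 1][1] > point[1]:
-- 			winding_number -= 1
-- 		if winding_number == 2 or winding_number == -2:
-- 			border_reached = True
-- 		elif winding_number == 0 and border_reached:
-- 			return False
-- 	return winding_number != 0
-- ===== SOURCE B (Python) =====
-- def _is_point_in_positions_x(point, positions):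
--     # Two staged passes: first materialize the running winding numbers (prefix
--     # sums of per-edge crossing contributions), then decide declaratively:
--     # inside iff the final winding is nonzero and no prefix winding returns to 0
--     # after the first prefix that reaches +-2.
--     px, py = point
--     start = 0 if positions[0][0] == positions[1][0] else -1
--     prefixes = []
--     s = 0
--     for i in range(start, len(positions) + start, 2):
--         a = positions[i]
--         if a[0] > px:
--             b = positions[i + 1]
--             s += (a[1] > py) - (a[1] < py) - (b[1] > py) + (b[1] < py)
--         prefixes.append(s)
--     if not prefixes or prefixes[-1] == 0:
--         return False
--     cut = next((j for j, p in enumerate(prefixes) if p in (2, -2)), None)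
--     return cut is None or 0 not in prefixes[cut + 1:]
-- ===== Notes on version B (the rewrite author's own statement) =====
-- stated objective: alternative
-- what changed: B replaces A's stateful single pass (border flag, early return, 5-branch elif ladder) by two staged passes: it first materializes the list of running winding numbers (prefix sums of per-edge crossing contributions), then answers declaratively: inside iff the final winding is nonzero and no prefix winding returns to 0 after the first prefix that reaches +-2.
-- outside the precondition, e.g. on _is_point_in_positions_x((0, 0), [(1, 1), (1, -1), (1, -1), (1, 1), (2, 5)]): A returns False, B raises IndexError; on _is_point_in_positions_x((0, 0), [(1, 1)]): A raises IndexError, B raises IndexError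
import Mathlib
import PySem

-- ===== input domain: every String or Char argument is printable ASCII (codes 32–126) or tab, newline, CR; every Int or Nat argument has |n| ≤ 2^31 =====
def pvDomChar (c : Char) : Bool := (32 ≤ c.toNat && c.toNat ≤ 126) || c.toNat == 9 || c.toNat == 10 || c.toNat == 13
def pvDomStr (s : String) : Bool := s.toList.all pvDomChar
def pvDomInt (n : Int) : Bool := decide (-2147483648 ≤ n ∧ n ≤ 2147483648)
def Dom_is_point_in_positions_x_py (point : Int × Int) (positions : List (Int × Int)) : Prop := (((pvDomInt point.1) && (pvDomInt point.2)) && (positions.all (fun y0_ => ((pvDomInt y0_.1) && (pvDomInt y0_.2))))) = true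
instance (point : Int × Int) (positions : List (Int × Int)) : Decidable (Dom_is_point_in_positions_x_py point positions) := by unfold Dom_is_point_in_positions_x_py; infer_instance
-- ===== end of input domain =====

-- B replaces A's stateful one-pass loop (border flag, early return, 5-branch ladder) by two
-- staged passes: materialize the prefix sums of per-edge contributions, then decide
-- declaratively (final sum nonzero and no zero prefix after the first ±2 prefix). objective: alternative.

-- ===== PORT A =====
-- positions[i]: total form of pyGet?; exact whenever the index is in range, which Pre_ guarantees
def pvGet (positions : List (Int × Int)) (i : Int) : Int × Int :=
  (PySem.List.pyGet? positions i).getD (0, 0)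

-- the for-loop of A with its early `return False` (continue skips the border check);
-- the and/or conditions are evaluated non-short-circuit here, same value on in-range indices
def pvALoop (point : Int × Int) (positions : List (Int × Int)) :
    List Int → Bool → Int → Bool
  | [], _, w => decide (w ≠ 0)
  | i :: rest, border, w =>
    let pi := pvGet positions i
    let pj := pvGet positions (i + 1)
    if pi.1 ≤ point.1 then pvALoop point positions rest border w
    else
      let w' :=
        if pi.2 > point.2 ∧ pj.2 < point.2 then w + 2
        else if pi.2 < point.2 ∧ pj.2 > point.2 then w - 2
        else if (pi.2 > point.2 ∧ pj.2 = point.2) ∨ (pi.2 = point.2 ∧ pj.2 < point.2) then w + 1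
        else if (pi.2 < point.2 ∧ pj.2 = point.2) ∨ (pi.2 = point.2 ∧ pj.2 > point.2) then w - 1
        else w
      if w' = 2 ∨ w' = -2 then pvALoop point positions rest true w'
      else if w' = 0 ∧ border then false
      else pvALoop point positions rest border w'

def is_point_in_positions_x_py (point : Int × Int) (positions : List (Int × Int)) : Bool :=
  let L : Int := (positions.length : Int)
  let paired_range :=
    if (pvGet positions 0).1 = (pvGet positions 1).1 then PySem.List.pyRange 0 L 2
    else PySem.List.pyRange (-1) (L - 1) 2
  pvALoop point positions paired_range false 0

-- ===== PORT B =====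
-- the prefix-building for-loop of Source B: appends the running sum for every paired index
def pvPrefixes (point : Int × Int) (positions : List (Int × Int)) :
    List Int → Int → List Int
  | [], _ => []
  | i :: rest, s =>
    let a := pvGet positions i
    let s' :=
      if a.1 > point.1 then
        let b := pvGet positions (i + 1)
        s + ((if a.2 > point.2 then 1 else 0) - (if a.2 < point.2 then 1 else 0)
             - (if b.2 > point.2 then 1 else 0) + (if b.2 < point.2 then 1 else 0))
      else s
    s' :: pvPrefixes point positions rest s'

def is_point_in_positions_x_py_alt (point : Int × Int) (positions : List (Int × Int)) : Bool :=
  let start : Int := if (pvGet positions 0).1 = (pvGet positions 1).1 then 0 else -1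
  let idxs := PySem.List.pyRange start ((positions.length : Int) + start) 2
  let prefixes := pvPrefixes point positions idxs 0
  if prefixes = [] ∨ prefixes.getLastD 0 = 0 then false
  else
    match prefixes.findIdx? (fun p => p == 2 || p == -2) with
    | none => true
    | some cut => !((prefixes.drop (cut + 1)).contains 0)

-- ===== PRECONDITION & SPEC =====
-- Pre_ excludes (a) lists of fewer than two vertices, where both programs raise IndexError, and
-- (b) odd-length lists whose pairing starts at index 0 (first two x-coordinates equal) and whose
-- last vertex lies strictly right of the point: there A reads positions[len] and raises
-- IndexError unless an early border return fires first (a conservative, closed-form exclusion).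
def Pre_is_point_in_positions_x_py (point : Int × Int) (positions : List (Int × Int)) : Prop :=
  2 ≤ positions.length ∧
    ((positions.getD 0 (0, 0)).1 = (positions.getD 1 (0, 0)).1 → positions.length % 2 = 1 →
      (positions.getLastD (0, 0)).1 ≤ point.1)
instance (point : Int × Int) (positions : List (Int × Int)) : Decidable (Pre_is_point_in_positions_x_py point positions) := by unfold Pre_is_point_in_positions_x_py; infer_instance
def pvWitness_is_point_in_positions_x_py : (Int × Int) × (List (Int × Int)) := ((0, 0), [(1, 1), (1, -1)])

def Spec_is_point_in_positions_x_py (point : Int × Int) (positions : List (Int × Int)) (out : Bool) : Prop := out = is_point_in_positions_x_py_alt point positions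
instance (point : Int × Int) (positions : List (Int × Int)) (out : Bool) : Decidable (Spec_is_point_in_positions_x_py point positions out) := by unfold Spec_is_point_in_positions_x_py; infer_instance

-- ===== CLAIM (what is proved, stated in full; the proofs are below) =====
def Claim_equal_is_point_in_positions_x_py : Prop := ∀ (point : Int × Int) (positions : List (Int × Int)), Dom_is_point_in_positions_x_py point positions → Pre_is_point_in_positions_x_py point positions → Spec_is_point_in_positions_x_py point positions (is_point_in_positions_x_py point positions)

-- ===== LEMMAS AND PROOFS =====

-- per-edge contribution (0 when the edge is skipped), shared abstraction of both loops
def pvDelta (point : Int × Int) (positions : List (Int × Int)) (i : Int) : Int :=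
  let a := pvGet positions i
  if a.1 > point.1 then
    let b := pvGet positions (i + 1)
    (if a.2 > point.2 then 1 else 0) - (if a.2 < point.2 then 1 else 0)
    - (if b.2 > point.2 then 1 else 0) + (if b.2 < point.2 then 1 else 0)
  else 0

-- A's loop, abstracted over the list of contributions (every step checked)
def pvCLoop : List Int → Bool → Int → Bool
  | [], _, w => decide (w ≠ 0)
  | c :: t, border, w =>
    let w' := w + c
    if w' = 2 ∨ w' = -2 then pvCLoop t true w'
    else if w' = 0 ∧ border then false
    else pvCLoop t border w'

def pvSums : Int → List Int → List Int
  | _, [] => []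
  | w, c :: t => (w + c) :: pvSums (w + c) t

def pvEarly : Bool → List Int → Bool
  | _, [] => false
  | border, p :: t =>
    if p = 2 ∨ p = -2 then pvEarly true t
    else if p = 0 ∧ border then true
    else pvEarly border t

lemma pvStep (point a b : Int × Int) (w : Int) :
    (if a.2 > point.2 ∧ b.2 < point.2 then w + 2
     else if a.2 < point.2 ∧ b.2 > point.2 then w - 2
     else if (a.2 > point.2 ∧ b.2 = point.2) ∨ (a.2 = point.2 ∧ b.2 < point.2) then w + 1
     else if (a.2 < point.2 ∧ b.2 = point.2) ∨ (a.2 = point.2 ∧ b.2 > point.2) then w - 1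
     else w)
    = w + ((if a.2 > point.2 then 1 else 0) - (if a.2 < point.2 then 1 else 0)
           - (if b.2 > point.2 then 1 else 0) + (if b.2 < point.2 then 1 else 0)) := by
  split_ifs <;> omega

-- A's index loop equals the contribution loop, given the reachability invariants
lemma pvALoop_eq_CLoop (point : Int × Int) (positions : List (Int × Int)) :
    ∀ (idxs : List Int) (border : Bool) (w : Int),
      (w = 0 → border = false) → ((w = 2 ∨ w = -2) → border = true) →
      pvALoop point positions idxs border w
        = pvCLoop (idxs.map (pvDelta point positions)) border w := by
  intro idxs
  induction idxs with
  | nil => intro border w _ _; simp [pvALoop, pvCLoop]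
  | cons i rest ih =>
      intro border w hP hQ
      simp only [pvALoop, pvCLoop, List.map_cons, pvDelta]
      by_cases hx : (pvGet positions i).1 ≤ point.1
      · have hx' : ¬ (pvGet positions i).1 > point.1 := by omega
        rw [if_pos hx, if_neg hx']
        by_cases h2 : w + 0 = 2 ∨ w + 0 = -2
        · rw [if_pos h2]
          have hb : border = true := hQ (by omega)
          have : w + 0 = w := by omega
          rw [this, ← hb]
          exact ih border w hP hQ
        · rw [if_neg h2]
          by_cases h0 : w + 0 = 0 ∧ border = true
          · exact absurd (hP (by omega)) (by simp [h0.2])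
          · rw [if_neg h0]
            have : w + 0 = w := by omega
            rw [this]
            exact ih border w hP hQ
      · have hx' : (pvGet positions i).1 > point.1 := by omega
        rw [if_neg hx, if_pos hx']
        rw [pvStep point (pvGet positions i) (pvGet positions (i + 1)) w]
        set w' := w + ((if (pvGet positions i).2 > point.2 then (1:Int) else 0)
          - (if (pvGet positions i).2 < point.2 then 1 else 0)
          - (if (pvGet positions (i+1)).2 > point.2 then 1 else 0)
          + (if (pvGet positions (i+1)).2 < point.2 then 1 else 0)) with hw'
        by_cases h2 : w' = 2 ∨ w' = -2
        · rw [if_pos h2, if_pos h2]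
          exact ih true w' (by intro hz; exact absurd h2 (by omega)) (fun _ => rfl)
        · rw [if_neg h2, if_neg h2]
          by_cases h0 : w' = 0 ∧ border = true
          · rw [if_pos h0, if_pos h0]
          · rw [if_neg h0, if_neg h0]
            refine ih border w' ?_ (by intro h; exact absurd h h2)
            intro hz
            by_contra hb
            exact h0 ⟨hz, by simpa using hb⟩

lemma pvCLoop_eq_early : ∀ (cs : List Int) (border : Bool) (w : Int),
    pvCLoop cs border w
      = (if pvEarly border (pvSums w cs) then false
         else decide ((pvSums w cs).getLastD w ≠ 0)) := by
  intro cs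
  induction cs with
  | nil => intro border w; simp [pvCLoop, pvSums, pvEarly]
  | cons c t ih =>
      intro border w
      simp only [pvCLoop, pvSums, pvEarly, List.getLastD_cons]
      by_cases h2 : w + c = 2 ∨ w + c = -2
      · rw [if_pos h2, if_pos h2, ih]
      · rw [if_neg h2, if_neg h2]
        by_cases h0 : w + c = 0 ∧ border = true
        · rw [if_pos h0, if_pos h0]
          simp
        · rw [if_neg h0, if_neg h0, ih]

lemma pvPrefixes_eq_sums (point : Int × Int) (positions : List (Int × Int)) :
    ∀ (idxs : List Int) (s : Int),
      pvPrefixes point positions idxs s = pvSums s (idxs.map (pvDelta point positions)) := by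
  intro idxs
  induction idxs with
  | nil => intro s; simp [pvPrefixes, pvSums]
  | cons i rest ih =>
      intro s
      simp only [pvPrefixes, pvSums, List.map_cons, pvDelta]
      by_cases hx : (pvGet positions i).1 > point.1
      · rw [if_pos hx, if_pos hx, ih]
      · rw [if_neg hx, if_neg hx]
        have : s + 0 = s := by omega
        rw [this, ih]

lemma pvEarly_true_eq_contains : ∀ (t : List Int), pvEarly true t = t.contains 0 := by
  intro t
  induction t with
  | nil => simp [pvEarly]
  | cons q t ih =>
      simp only [pvEarly, List.contains_cons]
      by_cases h2 : q = 2 ∨ q = -2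
      · have hq : (0 == q) = false := by
          rcases h2 with rfl | rfl <;> decide
        simp [h2, hq, ih]
      · by_cases hq : q = 0
        · simp [hq]
        · have hq0 : (0 == q) = false := by
            simp only [beq_eq_false_iff_ne]
            omega
          simp [h2, hq, hq0, ih]

lemma pvEarly_false_of_none : ∀ (ps : List Int),
    ps.findIdx? (fun p => p == 2 || p == -2) = none → pvEarly false ps = false := by
  intro ps
  induction ps with
  | nil => intro _; simp [pvEarly]
  | cons p t ih =>
      intro h
      rw [List.findIdx?_cons] at h
      by_cases hp : (p == 2 || p == -2) = true
      · rw [if_pos hp] at h; exact absurd h (by simp)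
      · rw [if_neg hp] at h
        have ht : t.findIdx? (fun p => p == 2 || p == -2) = none := by
          cases h' : t.findIdx? (fun p => p == 2 || p == -2) with
          | none => rfl
          | some v => rw [h'] at h; simp at h
        have h2 : ¬ (p = 2 ∨ p = -2) := by
          simpa using hp
        simp only [pvEarly]
        rw [if_neg h2]
        by_cases h0 : p = 0 ∧ (false : Bool) = true
        · exact absurd h0.2 (by simp)
        · rw [if_neg h0]
          exact ih ht

lemma pvEarly_false_of_some : ∀ (ps : List Int) (cut : Nat),
    ps.findIdx? (fun p => p == 2 || p == -2) = some cut →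
    pvEarly false ps = (ps.drop (cut + 1)).contains 0 := by
  intro ps
  induction ps with
  | nil => intro cut h; rw [List.findIdx?_nil] at h; exact absurd h (by simp)
  | cons p t ih =>
      intro cut h
      rw [List.findIdx?_cons] at h
      by_cases hp : (p == 2 || p == -2) = true
      · rw [if_pos hp] at h
        have hc : cut = 0 := by simpa using h.symm
        subst hc
        have h2 : p = 2 ∨ p = -2 := by simpa using hp
        simp only [pvEarly, List.drop_succ_cons, List.drop_zero]
        rw [if_pos h2]
        exact pvEarly_true_eq_contains t
      · rw [if_neg hp] at h
        cases h' : t.findIdx? (fun p => p == 2 || p == -2) with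
        | none => rw [h'] at h; simp at h
        | some cut' =>
          rw [h'] at h
          have hc : cut = cut' + 1 := by simpa using h.symm
          subst hc
          have h2 : ¬ (p = 2 ∨ p = -2) := by simpa using hp
          simp only [pvEarly, List.drop_succ_cons]
          rw [if_neg h2]
          by_cases h0 : p = 0 ∧ (false : Bool) = true
          · exact absurd h0.2 (by simp)
          · rw [if_neg h0]
            exact ih cut' h'

-- the staged decision of B agrees with early/last on prefixes starting from (false, 0)
lemma pvDecide_eq (ps : List Int) :
    (if pvEarly false ps then false else decide (ps.getLastD 0 ≠ 0))
      = (if ps = [] ∨ ps.getLastD 0 = 0 then false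
         else match ps.findIdx? (fun p => p == 2 || p == -2) with
           | none => true
           | some cut => !((ps.drop (cut + 1)).contains 0)) := by
  by_cases hz : ps = [] ∨ ps.getLastD 0 = 0
  · rw [if_pos hz]
    rcases hz with h | h
    · subst h; simp [pvEarly]
    · rw [h]
      simp
  · rw [if_neg hz]
    have hz2 : ps.getLastD 0 ≠ 0 := fun h => hz (Or.inr h)
    have hlast : decide (ps.getLastD 0 ≠ 0) = true := by
      simp only [decide_eq_true_eq]
      exact hz2
    cases h : ps.findIdx? (fun p => p == 2 || p == -2) with
    | none =>
        rw [pvEarly_false_of_none ps h]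
        simpa using hlast
    | some cut =>
        rw [pvEarly_false_of_some ps cut h]
        cases hc : (ps.drop (cut + 1)).contains 0 with
        | false =>
            have hm : ¬ (0 ∈ ps.drop (cut + 1)) := by simpa using hc
            have hz3 : ps.getLast?.getD 0 ≠ 0 := by simpa using hz2
            simp [hm, hz3]
        | true =>
            have hm : 0 ∈ ps.drop (cut + 1) := by simpa using hc
            simp [hm]

-- ===== VERDICT (by name: the statement is the Claim_ definition above) =====
theorem is_point_in_positions_x_py_spec : Claim_equal_is_point_in_positions_x_py := by
  unfold Claim_equal_is_point_in_positions_x_py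
  intro point positions _ _
  unfold Spec_is_point_in_positions_x_py
  simp only [is_point_in_positions_x_py, is_point_in_positions_x_py_alt]
  by_cases h : (pvGet positions 0).1 = (pvGet positions 1).1
  · rw [if_pos h, if_pos h]
    have hr : (positions.length : Int) + 0 = (positions.length : Int) := by omega
    rw [hr]
    rw [pvALoop_eq_CLoop point positions _ false 0 (fun _ => rfl) (by omega),
        pvCLoop_eq_early, pvPrefixes_eq_sums]
    exact pvDecide_eq _
  · rw [if_neg h, if_neg h]
    have hr : (positions.length : Int) + (-1) = (positions.length : Int) - 1 := by omega
    rw [hr]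
    rw [pvALoop_eq_CLoop point positions _ false 0 (fun _ => rfl) (by omega),
        pvCLoop_eq_early, pvPrefixes_eq_sums]
    exact pvDecide_eq _
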